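-- pv_equiv track=rewrite | github.com/key-moon/golf | base_code_minified/task176.py | p
-- ===== SOURCE A (Python) =====
-- def p(g):
-- 	for(E,B)in enumerate(g):
-- 		A=[-1]
-- 		for(C,F)in enumerate(B):
-- 			if F==2:A+=[C]
-- 		A+=[len(B)]
-- 		for D in range(len(A)-1):
-- 			if D%3==2*(E<1):
-- 				for C in range(A[D]+1,A[D+1]):B[C]=4
-- 	return g
-- ===== SOURCE B (Python) =====
-- def p(g):
--     for E, B in enumerate(g):
--         t = 2 if E == 0 else 0
--         seg = 0
--         for C, F in enumerate(B):
--             if F == 2: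
--                 seg += 1
--             elif seg % 3 == t:
--                 B[C] = 4
--     return g
-- ===== Notes on version B (the rewrite author's own statement) =====
-- stated objective: simpler
-- what changed: Replaces A's per-row boundary-index list and nested segment-fill loops with a single left-to-right pass per row that keeps a running count of 2-markers and writes each non-marker cell directly.
import Mathlib
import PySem

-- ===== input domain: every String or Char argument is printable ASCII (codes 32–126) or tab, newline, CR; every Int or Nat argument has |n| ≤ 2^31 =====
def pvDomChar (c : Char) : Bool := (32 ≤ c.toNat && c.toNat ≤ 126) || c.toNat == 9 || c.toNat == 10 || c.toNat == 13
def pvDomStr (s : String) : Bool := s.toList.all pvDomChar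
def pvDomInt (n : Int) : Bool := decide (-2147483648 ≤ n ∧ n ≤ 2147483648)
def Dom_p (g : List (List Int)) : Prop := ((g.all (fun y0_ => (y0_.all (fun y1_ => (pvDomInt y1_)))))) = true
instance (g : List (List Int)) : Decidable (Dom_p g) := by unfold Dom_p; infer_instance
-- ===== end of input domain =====

-- B replaces A's boundary-list + nested segment loops by one flat counting pass per row
-- (objective: simpler). Both Pythons mutate g's rows in place; the equivalence proved
-- here is about the RETURN value (B performs the same mutation as A).

-- ===== PORT A =====
-- boundary list A = [-1] ++ positions of 2 ++ [len(B)]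
def pBnds (B : List Int) : List Int :=
  ((PySem.List.enumerate B 0).foldl
    (fun acc cf => if cf.2 == 2 then acc ++ [cf.1] else acc) [(-1 : Int)]) ++ [(B.length : Int)]

-- inner loop: for C in range(lo, hi): B[C] = 4
def pFill (lo hi : Int) (B : List Int) : List Int :=
  (PySem.List.pyRange lo hi 1).foldl (fun Bc C => PySem.List.pySetD Bc C 4) B

-- one row of A's outer loop body
def pRow (E : Int) (B : List Int) : List Int :=
  let A := pBnds B
  (PySem.List.pyRange 0 ((A.length : Int) - 1) 1).foldl
    (fun Bc D =>
      if PySem.Int.mod D 3 == 2 * (if E < 1 then 1 else 0) then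
        pFill (PySem.List.pyGetD A D 0 + 1) (PySem.List.pyGetD A (D + 1) 0) Bc
      else Bc) B

def p (g : List (List Int)) : List (List Int) :=
  (PySem.List.enumerate g 0).map (fun eb => pRow eb.1 eb.2)

-- ===== PORT B =====
-- single pass with running marker counter seg
def rowAlt (t seg : Int) : List Int → List Int
  | [] => []
  | F :: rest =>
    if F == 2 then F :: rowAlt t (seg + 1) rest
    else (if PySem.Int.mod seg 3 == t then 4 else F) :: rowAlt t seg rest

def p_alt (g : List (List Int)) : List (List Int) :=
  (PySem.List.enumerate g 0).map (fun eb => rowAlt (if eb.1 == 0 then 2 else 0) 0 eb.2)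

-- ===== PRECONDITION & SPEC =====
def Spec_p (g : List (List Int)) (out : List (List Int)) : Prop := out = p_alt g
instance (g : List (List Int)) (out : List (List Int)) : Decidable (Spec_p g out) := by unfold Spec_p; infer_instance

-- ===== CLAIM (what is proved, stated in full; the proofs are below) =====
def Claim_equal_p : Prop := ∀ (g : List (List Int)), Dom_p g → Spec_p g (p g)

-- ===== LEMMAS AND PROOFS =====

-- positions of the value 2 in a row (proof-only reference)
def posN : List Int → List Nat
  | [] => []
  | x :: xs => if x = 2 then 0 :: (posN xs).map (· + 1) else (posN xs).map (· + 1)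



theorem enum_filter (B : List Int) (s : Int) :
    (((PySem.List.enumerate B s).filter (fun cf => cf.2 == 2)).map (·.1))
      = List.map (fun k : Nat => s + (k : Int)) (posN B) := by
  induction B generalizing s with
  | nil => simp [posN, PySem.List.enumerate_nil]
  | cons x xs ih =>
    rw [PySem.List.enumerate_cons, List.filter_cons]
    by_cases hx : x = 2
    · have hpa : (((s, x).2 == 2) = true) := by simp [hx]
      rw [if_pos hpa]
      simp only [posN, if_pos hx, List.map_cons, ih, List.map_map]
      refine congrArg₂ _ (by push_cast; ring) (List.map_congr_left ?_)
      intro k _; show s + 1 + (k : Int) = s + ((k + 1 : Nat) : Int); push_cast; ring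
    · have hpa : (((s, x).2 == 2) = false) := by simp [hx]
      rw [hpa]
      simp only [Bool.false_eq_true, if_false, posN, if_neg hx, ih, List.map_map]
      refine List.map_congr_left ?_
      intro k _; show s + 1 + (k : Int) = s + ((k + 1 : Nat) : Int); push_cast; ring

theorem pBnds_eq (B : List Int) :
    pBnds B = -1 :: (List.map (fun k : Nat => (k : Int)) (posN B) ++ [(B.length : Int)]) := by
  unfold pBnds
  rw [PySem.List.foldl_append_if, enum_filter B 0]
  simp

theorem posN_lt (B : List Int) : ∀ j ∈ posN B, j < B.length := by
  induction B with
  | nil => simp [posN]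
  | cons x xs ih =>
    intro j hj
    simp only [List.length_cons]
    by_cases hx : x = 2
    · rw [posN, if_pos hx] at hj
      rcases List.mem_cons.mp hj with rfl | hj'
      · omega
      · obtain ⟨i, hi, rfl⟩ := List.mem_map.mp hj'
        have := ih i hi; omega
    · rw [posN, if_neg hx] at hj
      obtain ⟨i, hi, rfl⟩ := List.mem_map.mp hj
      have := ih i hi; omega

theorem posN_pairwise (B : List Int) : (posN B).Pairwise (· < ·) := by
  induction B with
  | nil => simp [posN]
  | cons x xs ih =>
    have hmap : ((posN xs).map (· + 1)).Pairwise (· < ·) :=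
      List.pairwise_map.mpr (ih.imp (by omega))
    by_cases hx : x = 2
    · rw [posN, if_pos hx]
      exact List.Pairwise.cons (by intro a ha; obtain ⟨i, _, rfl⟩ := List.mem_map.mp ha; omega) hmap
    · rw [posN, if_neg hx]; exact hmap

theorem posN_length (B : List Int) : (posN B).length = B.count 2 := by
  induction B with
  | nil => simp [posN]
  | cons x xs ih =>
    by_cases hx : x = 2
    · rw [posN, if_pos hx]; simp [hx, ih]
    · rw [posN, if_neg hx]; simp [hx, ih]

theorem posN_mem_iff (B : List Int) (C : Nat) (h : C < B.length) :
    C ∈ posN B ↔ B[C] = 2 := by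
  induction B generalizing C with
  | nil => simp at h
  | cons x xs ih =>
    cases C with
    | zero =>
      by_cases hx : x = 2
      · rw [posN, if_pos hx]; simp [hx]
      · rw [posN, if_neg hx]; simp [hx]
    | succ C =>
      have h' : C < xs.length := by simpa using h
      by_cases hx : x = 2
      · rw [posN, if_pos hx]; simp [ih C h']
      · rw [posN, if_neg hx]; simp [ih C h']

theorem posN_getElem? (B : List Int) (j i : Nat) (h : (posN B)[j]? = some i) :
    (B.take i).count 2 = j ∧ ∃ hi : i < B.length, B[i] = 2 := by
  induction B generalizing j i with
  | nil => simp [posN] at h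
  | cons x xs ih =>
    by_cases hx : x = 2
    · rw [posN, if_pos hx] at h
      cases j with
      | zero =>
        simp at h
        subst h
        simpa using hx
      | succ j =>
        rw [List.getElem?_cons_succ, List.getElem?_map] at h
        cases hi' : (posN xs)[j]? with
        | none => rw [hi'] at h; simp at h
        | some i' =>
          rw [hi'] at h
          simp at h
          obtain ⟨h1, h2⟩ := ih j i' hi'
          obtain ⟨hlt, hval⟩ := h2
          subst h
          refine ⟨?_, ⟨by simpa using hlt, by simpa using hval⟩⟩
          simp [List.take_succ_cons, h1, hx]
    · rw [posN, if_neg hx] at h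
      rw [List.getElem?_map] at h
      cases hi' : (posN xs)[j]? with
      | none => rw [hi'] at h; simp at h
      | some i' =>
        rw [hi'] at h
        simp at h
        obtain ⟨h1, hlt, hval⟩ := ih j i' hi'
        subst h
        refine ⟨?_, ⟨by simpa using hlt, by simpa using hval⟩⟩
        simp [List.take_succ_cons, h1, hx]

theorem countTake_mono (B : List Int) (C1 C2 : Nat) (h : C1 ≤ C2) :
    (B.take C1).count 2 ≤ (B.take C2).count 2 := by
  have : B.take C1 = (B.take C2).take C1 := by rw [List.take_take, Nat.min_eq_left h]
  rw [this]
  exact ((B.take C2).take_sublist C1).count_le 2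

theorem countTake_le (B : List Int) (C : Nat) : (B.take C).count 2 ≤ B.count 2 :=
  (B.take_sublist C).count_le 2

theorem countTake_succ (B : List Int) (C : Nat) (h : C < B.length) :
    (B.take (C + 1)).count 2 = (B.take C).count 2 + (if B[C] = 2 then 1 else 0) := by
  rw [List.take_add_one, List.count_append]
  congr 1
  rw [List.getElem?_eq_getElem h]
  by_cases hv : B[C] = 2 <;> simp [hv]

theorem rowAlt_getElem? (t seg : Int) (B : List Int) (C : Nat) :
    (rowAlt t seg B)[C]? = B[C]?.map (fun F =>
      if F = 2 then F
      else if PySem.Int.mod (seg + ((B.take C).count 2 : Int)) 3 = t then 4 else F) := by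
  induction B generalizing seg C with
  | nil => simp [rowAlt]
  | cons x xs ih =>
    by_cases hx : x = 2
    · rw [rowAlt, if_pos (by simp [hx])]
      cases C with
      | zero => simp [hx]
      | succ C =>
        simp only [List.getElem?_cons_succ, ih, List.take_succ_cons, List.count_cons, hx]
        congr 1
        funext F
        by_cases hF : F = 2
        · simp [hF]
        · simp only [hF]
          have : seg + 1 + ((xs.take C).count 2 : Int)
               = seg + (((xs.take C).count 2 + 1 : Nat) : Int) := by push_cast; ring
          rw [this]
          simp
    · rw [rowAlt, if_neg (by simp [hx])]
      cases C with
      | zero =>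
        simp only [List.getElem?_cons_zero, Option.map_some, List.take_zero, List.count_nil]
        by_cases hc : PySem.Int.mod (seg + ((0:Nat) : Int)) 3 = t
        · rw [if_pos (by simpa using hc), if_neg hx, if_pos hc]
        · rw [if_neg (by simpa using hc), if_neg hx, if_neg hc]
      | succ C =>
        simp only [List.getElem?_cons_succ, ih, List.take_succ_cons, List.count_cons]
        simp [hx]

theorem pFill_getElem? (lo hi : Int) (B : List Int) (hlo : 0 ≤ lo) (C : Nat) :
    (pFill lo hi B)[C]? = B[C]?.map (fun F =>
      if lo ≤ (C : Int) ∧ (C : Int) < hi then 4 else F) := by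
  induction hn : (hi - lo).toNat generalizing lo B with
  | zero =>
    have hle : hi ≤ lo := by omega
    rw [pFill, PySem.List.pyRange_one_eq_nil hle, List.foldl_nil]
    cases hB : B[C]? with
    | none => simp
    | some F => simp; intro h1 h2; omega
  | succ n ih =>
    have hlt : lo < hi := by omega
    rw [pFill, PySem.List.pyRange_one_cons hlt, List.foldl_cons]
    have step : ((PySem.List.pyRange (lo+1) hi 1).foldl
        (fun Bc C => PySem.List.pySetD Bc C 4) (PySem.List.pySetD B lo 4))
        = pFill (lo+1) hi (PySem.List.pySetD B lo 4) := rfl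
    rw [step, ih (lo+1) (PySem.List.pySetD B lo 4) (by omega) (by omega)]
    rw [PySem.List.pySetD_of_nonneg B 4 hlo, List.getElem?_set]
    by_cases he : lo.toNat = C
    · rw [if_pos he]
      by_cases hl : lo.toNat < B.length
      · rw [if_pos hl]
        rw [List.getElem?_eq_getElem (show C < B.length by omega)]
        simp; omega
      · rw [if_neg hl]
        rw [List.getElem?_eq_none (by omega)]
        simp
    · rw [if_neg he]
      cases hB : B[C]? with
      | none => simp
      | some F =>
        simp only [Option.map_some, Option.some.injEq]
        have : ¬ (C:Int) = lo := by omega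
        by_cases h1 : lo + 1 ≤ (C:Int) ∧ (C:Int) < hi
        · rw [if_pos h1, if_pos (by omega)]
        · rw [if_neg h1]
          by_cases h2 : lo ≤ (C:Int) ∧ (C:Int) < hi
          · exfalso; omega
          · rw [if_neg h2]

def outerF (A : List Int) (t : Int) (b : Int) (Bc : List Int) : List Int :=
  (PySem.List.pyRange 0 b 1).foldl
    (fun Bc D =>
      if PySem.Int.mod D 3 == t then
        pFill (PySem.List.pyGetD A D 0 + 1) (PySem.List.pyGetD A (D + 1) 0) Bc
      else Bc) Bc

theorem outerF_getElem? (A : List Int) (t : Int)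
    (hA : ∀ D : Nat, -1 ≤ PySem.List.pyGetD A (D : Int) 0)
    (b : Nat) (Bc : List Int) (C : Nat) :
    (outerF A t (b : Int) Bc)[C]? = Bc[C]?.map (fun F =>
      if ∃ D : Nat, D < b ∧ PySem.Int.mod (D : Int) 3 = t ∧
          PySem.List.pyGetD A (D : Int) 0 < (C : Int) ∧
          (C : Int) < PySem.List.pyGetD A ((D : Int) + 1) 0
      then 4 else F) := by
  induction b with
  | zero =>
    rw [outerF, PySem.List.pyRange_one_eq_nil (by omega), List.foldl_nil]
    cases hB : Bc[C]? with
    | none => simp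
    | some F => simp
  | succ b ih =>
    have hcast : (((b + 1 : Nat)) : Int) = (b : Int) + 1 := by push_cast; ring
    rw [outerF, hcast, PySem.List.pyRange_one_succ_right (by omega), List.foldl_append,
      List.foldl_cons, List.foldl_nil]
    have hprev : ((PySem.List.pyRange 0 (b : Int) 1).foldl
        (fun Bc D =>
          if PySem.Int.mod D 3 == t then
            pFill (PySem.List.pyGetD A D 0 + 1) (PySem.List.pyGetD A (D + 1) 0) Bc
          else Bc) Bc) = outerF A t (b : Int) Bc := rfl
    rw [hprev]
    by_cases hcond : PySem.Int.mod (b : Int) 3 = t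
    · rw [if_pos (beq_iff_eq.mpr hcond)]
      rw [pFill_getElem? _ _ _ (by have := hA b; omega) C, ih]
      rw [Option.map_map]
      cases hB : Bc[C]? with
      | none => simp
      | some F =>
        simp only [Option.map_some, Option.some.injEq, Function.comp]
        by_cases hseg : PySem.List.pyGetD A (b : Int) 0 < (C : Int) ∧
            (C : Int) < PySem.List.pyGetD A ((b : Int) + 1) 0
        · have hex : ∃ D : Nat, D < b + 1 ∧ PySem.Int.mod (D : Int) 3 = t ∧
              PySem.List.pyGetD A (D : Int) 0 < (C : Int) ∧
              (C : Int) < PySem.List.pyGetD A ((D : Int) + 1) 0 :=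
            ⟨b, by omega, hcond, hseg.1, hseg.2⟩
          rw [if_pos hex]
          by_cases hex' : ∃ D : Nat, D < b ∧ PySem.Int.mod (D : Int) 3 = t ∧
              PySem.List.pyGetD A (D : Int) 0 < (C : Int) ∧
              (C : Int) < PySem.List.pyGetD A ((D : Int) + 1) 0
          · rw [if_pos hex']; rw [if_pos (by omega)]
          · rw [if_neg hex']
            rw [if_pos (by constructor <;> omega)]
        · rw [if_neg (by omega)]
          by_cases hex' : ∃ D : Nat, D < b ∧ PySem.Int.mod (D : Int) 3 = t ∧
              PySem.List.pyGetD A (D : Int) 0 < (C : Int) ∧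
              (C : Int) < PySem.List.pyGetD A ((D : Int) + 1) 0
          · rw [if_pos hex', if_pos ?_]
            obtain ⟨D, h1, h⟩ := hex'
            exact ⟨D, by omega, h⟩
          · rw [if_neg hex', if_neg ?_]
            rintro ⟨D, h1, h2, h3, h4⟩
            rcases Nat.lt_succ_iff_lt_or_eq.mp h1 with h1' | rfl
            · exact hex' ⟨D, h1', h2, h3, h4⟩
            · exact hseg ⟨h3, h4⟩
    · rw [if_neg (fun h => hcond (beq_iff_eq.mp h))]
      rw [ih]
      cases hB : Bc[C]? with
      | none => simp
      | some F =>
        simp only [Option.map_some, Option.some.injEq]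
        by_cases hex' : ∃ D : Nat, D < b ∧ PySem.Int.mod (D : Int) 3 = t ∧
            PySem.List.pyGetD A (D : Int) 0 < (C : Int) ∧
            (C : Int) < PySem.List.pyGetD A ((D : Int) + 1) 0
        · rw [if_pos hex', if_pos ?_]
          obtain ⟨D, h1, h⟩ := hex'
          exact ⟨D, by omega, h⟩
        · rw [if_neg hex', if_neg ?_]
          rintro ⟨D, h1, h2, h3, h4⟩
          rcases Nat.lt_succ_iff_lt_or_eq.mp h1 with h1' | rfl
          · exact hex' ⟨D, h1', h2, h3, h4⟩
          · exact hcond h2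

theorem pBnds_length (B : List Int) : (pBnds B).length = (posN B).length + 2 := by
  rw [pBnds_eq]; simp

theorem pBnds_pairwise (B : List Int) : (pBnds B).Pairwise (· < ·) := by
  rw [pBnds_eq]
  refine List.Pairwise.cons ?_ ?_
  · intro a ha
    rcases List.mem_append.mp ha with h | h
    · obtain ⟨i, _, rfl⟩ := List.mem_map.mp h; omega
    · simp at h; omega
  · rw [List.pairwise_append]
    refine ⟨List.pairwise_map.mpr ((posN_pairwise B).imp (by intro a b; omega)),
      List.pairwise_singleton _ _, ?_⟩
    intro a ha b hb
    obtain ⟨i, hi, rfl⟩ := List.mem_map.mp ha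
    simp at hb; subst hb
    have := posN_lt B i hi; omega

theorem getA_natCast (B : List Int) (D : Nat) :
    PySem.List.pyGetD (pBnds B) (D : Int) 0 = ((pBnds B)[D]?).getD 0 := by
  rw [PySem.List.pyGetD_natCast, List.getD_eq_getElem?_getD]

theorem getA_zero (B : List Int) : PySem.List.pyGetD (pBnds B) ((0 : Nat) : Int) 0 = -1 := by
  rw [getA_natCast, pBnds_eq]; rfl

theorem getA_pos (B : List Int) (j i : Nat) (h : (posN B)[j]? = some i) :
    PySem.List.pyGetD (pBnds B) ((j + 1 : Nat) : Int) 0 = (i : Int) := by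
  rw [getA_natCast, pBnds_eq]
  have hj : j < (posN B).length := by by_contra hc; rw [List.getElem?_eq_none (by omega)] at h; simp at h
  rw [List.getElem?_cons_succ, List.getElem?_append_left (by simpa using hj), List.getElem?_map, h]
  rfl

theorem getA_last (B : List Int) :
    PySem.List.pyGetD (pBnds B) (((posN B).length + 1 : Nat) : Int) 0 = (B.length : Int) := by
  rw [getA_natCast, pBnds_eq]
  rw [List.getElem?_cons_succ, List.getElem?_append_right (by simp)]
  simp

theorem getA_ge (B : List Int) (D : Nat) : -1 ≤ PySem.List.pyGetD (pBnds B) (D : Int) 0 := by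
  rw [getA_natCast]
  cases h : (pBnds B)[D]? with
  | none => simp
  | some a =>
    have ha : a ∈ pBnds B := List.mem_of_getElem? h
    rw [pBnds_eq] at ha
    simp only [Option.getD_some]
    rcases List.mem_cons.mp ha with rfl | ha'
    · omega
    · rcases List.mem_append.mp ha' with h' | h'
      · obtain ⟨i, _, rfl⟩ := List.mem_map.mp h'; omega
      · simp at h'; omega

theorem getA_strictMono (B : List Int) (D1 D2 : Nat) (h1 : D1 < D2)
    (h2 : D2 < (pBnds B).length) :
    PySem.List.pyGetD (pBnds B) (D1 : Int) 0 < PySem.List.pyGetD (pBnds B) (D2 : Int) 0 := by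
  rw [getA_natCast, getA_natCast]
  have hl1 : D1 < (pBnds B).length := by omega
  rw [List.getElem?_eq_getElem hl1, List.getElem?_eq_getElem h2]
  exact List.pairwise_iff_getElem.mp (pBnds_pairwise B) D1 D2 hl1 h2 h1

theorem getA_mono (B : List Int) (D1 D2 : Nat) (h1 : D1 ≤ D2)
    (h2 : D2 < (pBnds B).length) :
    PySem.List.pyGetD (pBnds B) (D1 : Int) 0 ≤ PySem.List.pyGetD (pBnds B) (D2 : Int) 0 := by
  rcases Nat.lt_or_eq_of_le h1 with h | rfl
  · exact le_of_lt (getA_strictMono B D1 D2 h h2)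
  · exact le_refl _

theorem crux (B : List Int) (t : Int) (C : Nat) (hC : C < B.length) :
    (∃ D : Nat, D < (posN B).length + 1 ∧ PySem.Int.mod (D : Int) 3 = t ∧
        PySem.List.pyGetD (pBnds B) (D : Int) 0 < (C : Int) ∧
        (C : Int) < PySem.List.pyGetD (pBnds B) ((D : Int) + 1) 0)
    ↔ (¬ B[C] = 2 ∧ PySem.Int.mod (((B.take C).count 2 : Nat) : Int) 3 = t) := by
  have hmlen : (pBnds B).length = (posN B).length + 2 := pBnds_length B
  have hkle : (B.take C).count 2 ≤ (posN B).length := by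
    rw [posN_length]; exact countTake_le B C
  constructor
  · rintro ⟨D, hD, hmod, hlo, hhi⟩
    have hhi' : (C : Int) < PySem.List.pyGetD (pBnds B) ((D + 1 : Nat) : Int) 0 := by
      push_cast; exact_mod_cast hhi
    have hne : ¬ B[C] = 2 := by
      intro h2
      obtain ⟨j, hj⟩ := List.getElem?_of_mem ((posN_mem_iff B C hC).mpr h2)
      have hgj : PySem.List.pyGetD (pBnds B) ((j + 1 : Nat) : Int) 0 = (C : Int) :=
        getA_pos B j C hj
      have hjm : j < (posN B).length := by
        by_contra hc; rw [List.getElem?_eq_none (by omega)] at hj; simp at hj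
      -- D < j+1 from hlo
      have h1 : D < j + 1 := by
        by_contra hc
        have := getA_mono B (j + 1) D (by omega) (by omega)
        omega
      -- j+1 < D+1 from hhi
      have h2' : j + 1 < D + 1 := by
        by_contra hc
        have := getA_mono B (D + 1) (j + 1) (by omega) (by omega)
        omega
      omega
    have hbC : (if B[C] = 2 then 1 else 0) = 0 := by simp [hne]
    -- D = count
    have hDk : D = (B.take C).count 2 := by
      have hge : (B.take C).count 2 ≥ D := by
        cases D with
        | zero => omega
        | succ j =>
          have hjm : j < (posN B).length := by omega
          obtain ⟨i, hi⟩ : ∃ i, (posN B)[j]? = some i := by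
            rw [List.getElem?_eq_getElem hjm]; exact ⟨_, rfl⟩
          obtain ⟨hcnt, hilen, hival⟩ := posN_getElem? B j i hi
          have hgj : PySem.List.pyGetD (pBnds B) ((j + 1 : Nat) : Int) 0 = (i : Int) :=
            getA_pos B j i hi
          have hiC : i < C := by
            have := hlo; rw [show ((Nat.succ j : Nat) : Int) = ((j + 1 : Nat) : Int) by push_cast; ring, hgj] at this
            exact_mod_cast this
          have hs : (B.take (i + 1)).count 2 = j + 1 := by
            rw [countTake_succ B i hilen, hcnt, if_pos hival]
          have := countTake_mono B (i + 1) C (by omega)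
          omega
      have hle2 : (B.take C).count 2 ≤ D := by
        rcases Nat.lt_or_ge D (posN B).length with hDm | hDm
        · obtain ⟨i, hi⟩ : ∃ i, (posN B)[D]? = some i := by
            rw [List.getElem?_eq_getElem hDm]; exact ⟨_, rfl⟩
          obtain ⟨hcnt, hilen, hival⟩ := posN_getElem? B D i hi
          have hgD : PySem.List.pyGetD (pBnds B) ((D + 1 : Nat) : Int) 0 = (i : Int) :=
            getA_pos B D i hi
          have hCi : C < i := by
            rw [hgD] at hhi'; exact_mod_cast hhi'
          have := countTake_mono B C i (by omega)
          omega
        · omega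
      omega
    rw [← hDk]
    exact ⟨hne, hmod⟩
  · rintro ⟨hne, hmod⟩
    set k := (B.take C).count 2 with hk
    refine ⟨k, by omega, hmod, ?_, ?_⟩
    · -- pyGetD at k < C
      cases hk0 : k with
      | zero => rw [show ((0 : Nat) : Int) = (((0:Nat)) : Int) by rfl, getA_zero]; omega
      | succ j =>
        have hjm : j < (posN B).length := by omega
        obtain ⟨i, hi⟩ : ∃ i, (posN B)[j]? = some i := by
          rw [List.getElem?_eq_getElem hjm]; exact ⟨_, rfl⟩
        obtain ⟨hcnt, hilen, hival⟩ := posN_getElem? B j i hi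
        rw [show ((Nat.succ j : Nat) : Int) = ((j + 1 : Nat) : Int) by push_cast; ring,
          getA_pos B j i hi]
        have : i < C := by
          by_contra hc
          have := countTake_mono B C i (by omega)
          omega
        exact_mod_cast this
    · -- C < pyGetD at k+1
      have hcast : ((k : Int) + 1) = ((k + 1 : Nat) : Int) := by push_cast; ring
      rw [hcast]
      rcases Nat.lt_or_ge k (posN B).length with hkm | hkm
      · obtain ⟨i, hi⟩ : ∃ i, (posN B)[k]? = some i := by
          rw [List.getElem?_eq_getElem hkm]; exact ⟨_, rfl⟩
        obtain ⟨hcnt, hilen, hival⟩ := posN_getElem? B k i hi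
        rw [getA_pos B k i hi]
        have hCi : C < i := by
          rcases Nat.lt_trichotomy C i with h | h | h
          · exact h
          · exfalso; subst h; exact hne hival
          · exfalso
            have hs : (B.take (i + 1)).count 2 = k + 1 := by
              rw [countTake_succ B i hilen, hcnt, if_pos hival]
            have := countTake_mono B (i + 1) C (by omega)
            omega
        exact_mod_cast hCi
      · have hkm' : k = (posN B).length := by omega
        rw [hkm', getA_last]
        exact_mod_cast hC

theorem row_eq (E : Int) (hE : 0 ≤ E) (B : List Int) :
    pRow E B = rowAlt (if E == 0 then 2 else 0) 0 B := by
  have ht : (2 * (if E < 1 then 1 else 0) : Int) = (if E == 0 then 2 else 0) := by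
    by_cases h : E = 0
    · subst h; norm_num
    · rw [if_neg (show ¬ E < 1 by omega), if_neg (show ¬ (E == 0) = true by simpa using h)]
      norm_num
  have hb : ((pBnds B).length : Int) - 1 = (((posN B).length + 1 : Nat) : Int) := by
    rw [pBnds_length]; push_cast; ring
  have hrow : pRow E B
      = outerF (pBnds B) (2 * (if E < 1 then 1 else 0)) (((pBnds B).length : Int) - 1) B := rfl
  rw [hrow, hb, ht]
  apply List.ext_getElem?
  intro C
  rw [outerF_getElem? (pBnds B) _ (getA_ge B) ((posN B).length + 1) B C,
    rowAlt_getElem?]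
  cases hB : B[C]? with
  | none => simp
  | some F =>
    simp only [Option.map_some, Option.some.injEq]
    have hC : C < B.length := by
      by_contra hc; rw [List.getElem?_eq_none (by omega)] at hB; simp at hB
    have hBC : B[C] = F := by
      rw [List.getElem?_eq_getElem hC] at hB; exact (Option.some.injEq _ _).mp hB
    rw [← hBC]
    by_cases hF2 : B[C] = 2
    · rw [if_neg ?_, if_pos hF2]
      rw [crux B _ C hC]
      rintro ⟨h1, _⟩; exact h1 hF2
    · rw [if_neg hF2]
      by_cases hm : PySem.Int.mod (0 + (((B.take C).count 2 : Nat) : Int)) 3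
          = (if E == 0 then 2 else 0)
      · rw [if_pos ?_, if_pos hm]
        rw [crux B _ C hC]
        exact ⟨hF2, by rw [← hm]; ring_nf⟩
      · rw [if_neg ?_, if_neg hm]
        rw [crux B _ C hC]
        rintro ⟨_, h2⟩
        exact hm (by rw [← h2]; ring_nf)

theorem p_eq_alt (g : List (List Int)) : p g = p_alt g := by
  unfold p p_alt
  apply List.map_congr_left
  intro eb heb
  obtain ⟨k, hk, heq⟩ := (PySem.List.mem_enumerate_iff g 0 eb).mp heb
  subst heq
  exact row_eq _ (by omega) _

-- ===== VERDICT (by name: the statement is the Claim_ definition above) =====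
theorem p_spec : Claim_equal_p := by
  unfold Claim_equal_p Spec_p
  intro g _
  exact p_eq_alt g
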